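-- pv_equiv track=rewrite | github.com/matias-ky/phd | libs/analysis.py | tiempo_inicio_inicio
-- ===== SOURCE A (Python) =====
-- def tiempo_inicio_inicio(lim_a):
--     t_ii = []
--     contador = 1
--     for i in range(len(lim_a)-1):
--         if lim_a[i + 1] - lim_a[i] == 1:
--             contador = contador + 1
--             continue
--         else:
--             t_ii.append(lim_a[i + 1] - lim_a[i] + contador)
--             contador = 1
--     return t_ii
-- ===== SOURCE B (Python) =====
-- def tiempo_inicio_inicio(lim_a):
--     # Break-index table + telescoping over consecutive boundaries:
--     # inside a run every step is exactly +1, so the run count equals the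
--     # value difference; each emitted gap is lim_a[b_k] - lim_a[b_{k-1}] + 1.
--     boundaries = [0] + [i + 1 for i in range(len(lim_a) - 1)
--                         if lim_a[i + 1] - lim_a[i] != 1]
--     return [lim_a[boundaries[k]] - lim_a[boundaries[k - 1]] + 1
--             for k in range(1, len(boundaries))]
-- ===== Notes on version B (the rewrite author's own statement) =====
-- stated objective: alternative
-- what changed: Replaces the running counter with a precomputed break-index table and a telescoping pass over consecutive boundary values (the run count equals the value difference inside a run of +1 steps).
import Mathlib
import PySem

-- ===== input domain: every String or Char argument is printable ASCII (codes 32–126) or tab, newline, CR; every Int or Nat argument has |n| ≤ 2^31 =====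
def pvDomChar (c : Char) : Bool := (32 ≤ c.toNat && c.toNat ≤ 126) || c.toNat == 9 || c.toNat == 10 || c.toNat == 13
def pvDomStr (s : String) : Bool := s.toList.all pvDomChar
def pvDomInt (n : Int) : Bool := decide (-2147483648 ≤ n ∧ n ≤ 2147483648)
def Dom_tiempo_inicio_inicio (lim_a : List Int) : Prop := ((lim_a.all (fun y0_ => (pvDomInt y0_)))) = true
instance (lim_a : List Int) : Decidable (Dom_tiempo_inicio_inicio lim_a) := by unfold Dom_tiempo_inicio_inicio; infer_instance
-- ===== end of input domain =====

-- B replaces A's running counter with a break-index table and a telescoping pass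
-- over consecutive boundary values (objective: alternative decomposition).

-- ===== PORT A =====
-- indices i and i+1 are always in range for i in range(len-1), so pyGetD is exact here
def tiempo_inicio_inicio (lim_a : List Int) : List Int :=
  (((PySem.List.pyRange 0 ((lim_a.length : Int) - 1) 1).foldl
    (fun (st : List Int × Int) i =>
      if PySem.List.pyGetD lim_a (i + 1) 0 - PySem.List.pyGetD lim_a i 0 = 1 then
        (st.1, st.2 + 1)
      else
        (st.1 ++ [PySem.List.pyGetD lim_a (i + 1) 0 - PySem.List.pyGetD lim_a i 0 + st.2], 1))
    ([], 1)) : List Int × Int).1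

-- ===== PORT B =====
def tiempo_inicio_inicio_alt (lim_a : List Int) : List Int :=
  let boundaries : List Int :=
    0 :: (((PySem.List.pyRange 0 ((lim_a.length : Int) - 1) 1).filter
        (fun i => decide (PySem.List.pyGetD lim_a (i + 1) 0 - PySem.List.pyGetD lim_a i 0 ≠ 1))).map
      (fun i => i + 1))
  (PySem.List.pyRange 1 (boundaries.length : Int) 1).map
    (fun k =>
      PySem.List.pyGetD lim_a (PySem.List.pyGetD boundaries k 0) 0
        - PySem.List.pyGetD lim_a (PySem.List.pyGetD boundaries (k - 1) 0) 0 + 1)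

-- ===== PRECONDITION & SPEC =====
def Spec_tiempo_inicio_inicio (lim_a : List Int) (out : List Int) : Prop := out = tiempo_inicio_inicio_alt lim_a
instance (lim_a : List Int) (out : List Int) : Decidable (Spec_tiempo_inicio_inicio lim_a out) := by unfold Spec_tiempo_inicio_inicio; infer_instance

-- ===== CLAIM (what is proved, stated in full; the proofs are below) =====
def Claim_equal_tiempo_inicio_inicio : Prop := ∀ (lim_a : List Int), Dom_tiempo_inicio_inicio lim_a → Spec_tiempo_inicio_inicio lim_a (tiempo_inicio_inicio lim_a)

-- ===== LEMMAS AND PROOFS =====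

-- A's loop as structural recursion over adjacent pairs
def pvPairFold (st : List Int × Int) : List Int → List Int × Int
  | x :: y :: r =>
      pvPairFold (if y - x = 1 then (st.1, st.2 + 1) else (st.1 ++ [y - x + st.2], 1)) (y :: r)
  | _ => st

-- the values at break positions (B's boundary values, minus the leading anchor)
def pvBrkV : List Int → List Int
  | x :: y :: r => if y - x = 1 then pvBrkV (y :: r) else y :: pvBrkV (y :: r)
  | _ => []

theorem pvPairFold_short (st : List Int × Int) (l : List Int) (h : l.length ≤ 1) :
    pvPairFold st l = st := by
  match l, h with
  | [], _ => rfl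
  | [x], _ => rfl

-- Bridge A: the index fold over pyRange a (len-1) equals pvPairFold on the suffix
theorem pvBridgeA (lim : List Int) (a : Nat) (st : List Int × Int) :
    (PySem.List.pyRange (a : Int) ((lim.length : Int) - 1) 1).foldl
      (fun (st : List Int × Int) i =>
        if PySem.List.pyGetD lim (i + 1) 0 - PySem.List.pyGetD lim i 0 = 1 then
          (st.1, st.2 + 1)
        else
          (st.1 ++ [PySem.List.pyGetD lim (i + 1) 0 - PySem.List.pyGetD lim i 0 + st.2], 1))
      st = pvPairFold st (lim.drop a) := by
  by_cases h : (a : Int) < (lim.length : Int) - 1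
  · have ha1 : a + 1 < lim.length := by omega
    have ha : a < lim.length := by omega
    rw [PySem.List.pyRange_one_cons h]
    have g1 : PySem.List.pyGetD lim ((a : Int) + 1) 0 = lim[a + 1] := by
      have hcast' : ((a : Int) + 1) = ((a + 1 : Nat) : Int) := by push_cast; ring
      rw [hcast', PySem.List.pyGetD_natCast]
      simp [ha1]
    have g0 : PySem.List.pyGetD lim (a : Int) 0 = lim[a] := by
      rw [PySem.List.pyGetD_natCast]
      simp [ha]
    have hd : lim.drop a = lim[a] :: lim[a + 1] :: lim.drop (a + 2) := by
      rw [List.drop_eq_getElem_cons ha, List.drop_eq_getElem_cons ha1]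
    have hcast : ((a : Int) + 1) = ((a + 1 : Nat) : Int) := by push_cast; ring
    rw [List.foldl_cons, g1, g0, hcast, pvBridgeA lim (a + 1), hd]
    simp [pvPairFold]
  · rw [PySem.List.pyRange_one_eq_nil (by omega)]
    have : (lim.drop a).length ≤ 1 := by
      simp only [List.length_drop]; omega
    rw [List.foldl_nil, pvPairFold_short st _ this]
termination_by lim.length - a
decreasing_by all_goals omega

-- Bridge B1: the filtered-index break list, mapped back to values, is pvBrkV of the suffix
theorem pvBridgeB1 (lim : List Int) (a : Nat) :
    (((PySem.List.pyRange (a : Int) ((lim.length : Int) - 1) 1).filter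
        (fun i => decide (PySem.List.pyGetD lim (i + 1) 0 - PySem.List.pyGetD lim i 0 ≠ 1))).map
      (fun i => PySem.List.pyGetD lim (i + 1) 0)) = pvBrkV (lim.drop a) := by
  by_cases h : (a : Int) < (lim.length : Int) - 1
  · have ha1 : a + 1 < lim.length := by omega
    have ha : a < lim.length := by omega
    rw [PySem.List.pyRange_one_cons h]
    have g1 : PySem.List.pyGetD lim ((a : Int) + 1) 0 = lim[a + 1] := by
      have hcast' : ((a : Int) + 1) = ((a + 1 : Nat) : Int) := by push_cast; ring
      rw [hcast', PySem.List.pyGetD_natCast]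
      simp [ha1]
    have g0 : PySem.List.pyGetD lim (a : Int) 0 = lim[a] := by
      rw [PySem.List.pyGetD_natCast]
      simp [ha]
    have hd : lim.drop a = lim[a] :: lim[a + 1] :: lim.drop (a + 2) := by
      rw [List.drop_eq_getElem_cons ha, List.drop_eq_getElem_cons ha1]
    have hcast : ((a : Int) + 1) = ((a + 1 : Nat) : Int) := by push_cast; ring
    rw [List.filter_cons]
    by_cases hc : lim[a + 1] - lim[a] = 1
    · rw [if_neg (by simp [g1, g0, hc])]
      rw [hcast, pvBridgeB1 lim (a + 1), hd]
      simp [pvBrkV, hc]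
    · rw [if_pos (by simp [g1, g0, hc])]
      rw [List.map_cons, g1, hcast, pvBridgeB1 lim (a + 1), hd]
      simp [pvBrkV, hc]
  · rw [PySem.List.pyRange_one_eq_nil (by omega)]
    have hlen : (lim.drop a).length ≤ 1 := by simp only [List.length_drop]; omega
    match hdd : lim.drop a, hlen with
    | [], _ => rfl
    | [x], _ => rfl
termination_by lim.length - a
decreasing_by all_goals omega

-- Bridge B2: indexing consecutive pairs of any list bs via pyRange = zipWith on bs
theorem pvBridgeB2 (f : Int → Int → Int) (bs : List Int) (a : Nat) :
    (PySem.List.pyRange ((a : Int) + 1) ((bs.length : Int)) 1).map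
      (fun k => f (PySem.List.pyGetD bs (k - 1) 0) (PySem.List.pyGetD bs k 0))
      = List.zipWith f (bs.drop a) (bs.drop (a + 1)) := by
  by_cases h : (a : Int) + 1 < (bs.length : Int)
  · have ha1 : a + 1 < bs.length := by omega
    have ha : a < bs.length := by omega
    rw [PySem.List.pyRange_one_cons h]
    have g1 : PySem.List.pyGetD bs ((a : Int) + 1) 0 = bs[a + 1] := by
      have hcast' : ((a : Int) + 1) = ((a + 1 : Nat) : Int) := by push_cast; ring
      rw [hcast', PySem.List.pyGetD_natCast]
      simp [ha1]
    have g0 : PySem.List.pyGetD bs ((a : Int) + 1 - 1) 0 = bs[a] := by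
      have hcast' : ((a : Int) + 1 - 1) = ((a : Nat) : Int) := by omega
      rw [hcast', PySem.List.pyGetD_natCast]
      simp [ha]
    have hd : bs.drop a = bs[a] :: bs.drop (a + 1) := List.drop_eq_getElem_cons ha
    have hd1 : bs.drop (a + 1) = bs[a + 1] :: bs.drop (a + 2) := List.drop_eq_getElem_cons ha1
    have hcast : ((a : Int) + 1 + 1) = (((a + 1 : Nat) : Int) + 1) := by push_cast; ring
    rw [List.map_cons, g1, g0, hcast, pvBridgeB2 f bs (a + 1)]
    rw [hd, hd1]
    simp [List.zipWith]
  · rw [PySem.List.pyRange_one_eq_nil (by omega)]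
    have : bs.drop (a + 1) = [] := List.drop_eq_nil_of_le (by omega)
    simp [this]
termination_by bs.length - a
decreasing_by all_goals omega

-- appending to the accumulator commutes out of pvPairFold
theorem pvPairFold_acc (l : List Int) : ∀ (acc : List Int) (c : Int),
    (pvPairFold (acc, c) l).1 = acc ++ (pvPairFold ([], c) l).1 := by
  match l with
  | [] => intro acc c; simp [pvPairFold]
  | [x] => intro acc c; simp [pvPairFold]
  | x :: y :: r =>
    intro acc c
    by_cases hc : y - x = 1
    · simp only [pvPairFold, hc, if_pos]
      exact pvPairFold_acc (y :: r) acc (c + 1)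
    · simp only [pvPairFold, hc, ite_false]
      rw [pvPairFold_acc (y :: r) (acc ++ [y - x + c]) 1,
          pvPairFold_acc (y :: r) ([] ++ [y - x + c]) 1]
      simp

-- the core identity: A's pair fold telescopes into B's boundary-value zipWith
theorem pvCore (rest : List Int) : ∀ (x c : Int),
    (pvPairFold ([], c) (x :: rest)).1
      = List.zipWith (fun u v => v - u + 1) ((x - c + 1) :: pvBrkV (x :: rest)) (pvBrkV (x :: rest)) := by
  match rest with
  | [] => intro x c; simp [pvPairFold, pvBrkV]
  | y :: r =>
    intro x c
    by_cases hc : y - x = 1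
    · simp only [pvPairFold, hc, if_pos]
      have := pvCore r y (c + 1)
      rw [this]
      have hb : pvBrkV (x :: y :: r) = pvBrkV (y :: r) := by simp [pvBrkV, hc]
      rw [hb]
      have : y - (c + 1) + 1 = x - c + 1 := by omega
      rw [this]
    · simp only [pvPairFold, hc, ite_false]
      rw [pvPairFold_acc (y :: r) ([] ++ [y - x + c]) 1, pvCore r y 1]
      have hb : pvBrkV (x :: y :: r) = y :: pvBrkV (y :: r) := by simp [pvBrkV, hc]
      rw [hb]
      simp [List.zipWith]
      omega

-- ===== VERDICT (by name: the statement is the Claim_ definition above) =====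
theorem tiempo_inicio_inicio_spec : Claim_equal_tiempo_inicio_inicio := by
  intro lim_a _
  unfold Spec_tiempo_inicio_inicio
  unfold tiempo_inicio_inicio tiempo_inicio_inicio_alt
  match lim_a with
  | [] => rfl
  | x :: rest =>
    have hA := pvBridgeA (x :: rest) 0 ([], 1)
    simp only [Nat.cast_zero, List.drop_zero] at hA
    rw [hA, pvCore rest x 1]
    -- now the B side
    have hB1 := pvBridgeB1 (x :: rest) 0
    simp only [Nat.cast_zero, List.drop_zero] at hB1
    set idxs := (((PySem.List.pyRange 0 (((x :: rest).length : Int) - 1) 1).filter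
        (fun i => decide (PySem.List.pyGetD (x :: rest) (i + 1) 0 - PySem.List.pyGetD (x :: rest) i 0 ≠ 1))).map
      (fun i => i + 1)) with hidxs
    have hB2 := pvBridgeB2
      (fun p q => PySem.List.pyGetD (x :: rest) q 0 - PySem.List.pyGetD (x :: rest) p 0 + 1)
      (0 :: idxs) 0
    simp only [Nat.cast_zero, zero_add, List.drop_zero, List.drop_one] at hB2
    rw [hB2]
    have hmap : List.zipWith
        (fun p q => PySem.List.pyGetD (x :: rest) q 0 - PySem.List.pyGetD (x :: rest) p 0 + 1)
        (0 :: idxs) ((0 :: idxs).tail)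
        = List.zipWith (fun u v => v - u + 1)
            ((0 :: idxs).map (fun i => PySem.List.pyGetD (x :: rest) i 0))
            (((0 :: idxs).tail).map (fun i => PySem.List.pyGetD (x :: rest) i 0)) := by
      rw [List.zipWith_map]
    rw [hmap]
    have hvals : idxs.map (fun i => PySem.List.pyGetD (x :: rest) i 0) = pvBrkV (x :: rest) := by
      rw [hidxs, List.map_map]
      exact hB1
    simp only [List.tail_cons, List.map_cons, hvals]
    have h0 : PySem.List.pyGetD (x :: rest) 0 0 = x := PySem.List.pyGetD_zero_cons x rest 0
    rw [h0]
    have : x - 1 + 1 = x := by omega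
    rw [this]
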